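-- pv_equiv track=rewrite | github.com/cindyxinyuzhang/binarysearch | 0392 Parentheses Grouping.py | solve
-- ===== SOURCE A (Python) =====
-- def solve(s):
--     stack = 0
--     ans = []
--     l = 0
--     for i in range(len(s)):
--         if s[i] == '(':
--             stack += 1
--         else:
--             stack -= 1
--         if stack == 0:
--             ans.append(s[l:i+1])
--             l = i+1
--     return ans
-- ===== SOURCE B (Python) =====
-- def solve(s):
--     # Divide and conquer: zeros(lo, hi, bal) returns (indices i in (lo, hi] where the
--     # prefix balance reaches 0, given that the balance at lo is bal; balance at hi).
--     def zeros(lo, hi, bal):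
--         if hi - lo == 1:
--             b = bal + (1 if s[lo] == '(' else -1)
--             return ([hi] if b == 0 else []), b
--         mid = (lo + hi) // 2
--         zl, b1 = zeros(lo, mid, bal)
--         zr, b2 = zeros(mid, hi, b1)
--         return zl + zr, b2
--     cuts = [0] + (zeros(0, len(s), 0)[0] if s else [])
--     return [s[a:b] for a, b in zip(cuts, cuts[1:])]
-- ===== Notes on version B (the rewrite author's own statement) =====
-- stated objective: alternative
-- what changed: Replaces A's single left-to-right scan (running counter, slice emitted inline) by a divide-and-conquer recursion that splits the index interval in half, returns each half's zero-balance positions and net balance, combines them by seeding the right half with the left half's balance, and finally slices between consecutive cut positions.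
import Mathlib
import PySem

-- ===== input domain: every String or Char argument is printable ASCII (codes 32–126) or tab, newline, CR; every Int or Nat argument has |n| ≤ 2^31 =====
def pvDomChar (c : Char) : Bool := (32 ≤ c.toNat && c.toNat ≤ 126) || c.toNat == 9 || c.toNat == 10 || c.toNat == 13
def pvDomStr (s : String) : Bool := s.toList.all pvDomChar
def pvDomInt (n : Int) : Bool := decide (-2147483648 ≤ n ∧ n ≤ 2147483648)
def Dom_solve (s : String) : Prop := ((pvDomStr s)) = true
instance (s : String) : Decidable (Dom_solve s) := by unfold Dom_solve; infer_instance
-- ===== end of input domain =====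

-- B replaces A's single inline scan by a divide-and-conquer recursion over index
-- intervals (zero-balance positions + net balance per half) followed by slicing
-- between consecutive cuts; same result, different algorithm, no speed claim.

-- ===== PORT A =====
-- one interleaved loop: depth counter, emit slice s[l:i+1] whenever depth hits 0
def solveLoopA (cs : List Char) (acc : Int × List String × Nat) (i : Nat) : Int × List String × Nat :=
  let stack := if cs[i]! = '(' then acc.1 + 1 else acc.1 - 1
  if stack = 0 then
    (stack, acc.2.1 ++ [String.ofList (PySem.List.slice cs (some (acc.2.2 : Int)) (some ((i : Int) + 1)))], i + 1)
  else
    (stack, acc.2.1, acc.2.2)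

def solve (s : String) : List String :=
  ((List.range s.toList.length).foldl (solveLoopA s.toList) (0, [], 0)).2.1

-- ===== PORT B =====
-- zeros(lo, hi, bal): indices i in (lo, hi] where the prefix balance reaches 0,
-- given balance bal at lo, together with the balance at hi.
-- Python's base case is 'hi - lo == 1'; the guard here is 'hi - lo ≤ 1' only so the
-- function is total on the (unreachable from solve_alt) degenerate intervals hi ≤ lo,
-- where it returns ([], bal); on every interval solve_alt reaches it is Python's code.
def zerosB (cs : List Char) (lo hi : Nat) (bal : Int) : List Nat × Int :=
  if hi - lo ≤ 1 then
    if hi - lo = 1 then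
      let b := bal + (if cs[lo]! = '(' then 1 else -1)
      ((if b = 0 then [hi] else []), b)
    else ([], bal)
  else
    let mid := (lo + hi) / 2
    let zl := zerosB cs lo mid bal
    let zr := zerosB cs mid hi zl.2
    (zl.1 ++ zr.1, zr.2)
termination_by hi - lo
decreasing_by all_goals omega

-- cuts = [0] + (zeros(0, len(s), 0)[0] if s else []);  [s[a:b] for a, b in zip(cuts, cuts[1:])]
def solve_alt (s : String) : List String :=
  let cs := s.toList
  let cuts := 0 :: (if cs.length = 0 then [] else (zerosB cs 0 cs.length 0).1)
  (cuts.zip (cuts.drop 1)).map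
    (fun p => String.ofList (PySem.List.slice cs (some (p.1 : Int)) (some (p.2 : Int))))

-- ===== PRECONDITION & SPEC =====
def Spec_solve (s : String) (out : List String) : Prop := out = solve_alt s
instance (s : String) (out : List String) : Decidable (Spec_solve s out) := by unfold Spec_solve; infer_instance

-- ===== CLAIM (what is proved, stated in full; the proofs are below) =====
def Claim_equal_solve : Prop := ∀ (s : String), Dom_solve s → Spec_solve s (solve s)

-- ===== LEMMAS AND PROOFS =====

-- proof-internal: the cut-list form of the scan, bridging A's loop and B's recursion
def solveLoopB (cs : List Char) (acc : Int × List Nat) (i : Nat) : Int × List Nat :=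
  let d := if cs[i]! = '(' then acc.1 + 1 else acc.1 - 1
  if d = 0 then (d, acc.2 ++ [i + 1]) else (d, acc.2)

def zipSlices (cs : List Char) (cuts : List Nat) : List String :=
  (cuts.zip (cuts.drop 1)).map
    (fun p => String.ofList (PySem.List.slice cs (some (p.1 : Int)) (some (p.2 : Int))))

theorem getLastD_irrel {α : Type} (a : α) (t : List α) (x y : α) :
    (a :: t).getLast?.getD x = (a :: t).getLast?.getD y := by
  induction t generalizing a with
  | nil => rfl
  | cons b u ih => simpa using ih b

theorem zip_tail_append_last {α : Type} (xs : List α) (m : α) (h : xs ≠ []) :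
    (xs ++ [m]).zip ((xs ++ [m]).drop 1) = xs.zip (xs.drop 1) ++ [(xs.getLastD m, m)] := by
  induction xs with
  | nil => exact absurd rfl h
  | cons a t ih =>
    cases t with
    | nil => simp
    | cons b u =>
      have := ih (by simp)
      simp only [List.cons_append, List.drop_one, List.tail_cons, List.zip_cons_cons] at *
      rw [this]
      simp

theorem zipSlices_append (cs : List Char) (cuts : List Nat) (m : Nat) (h : cuts ≠ []) :
    zipSlices cs (cuts ++ [m]) =
      zipSlices cs cuts ++
        [String.ofList (PySem.List.slice cs (some (cuts.getLastD m : Int)) (some (m : Int)))] := by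
  unfold zipSlices
  rw [zip_tail_append_last cuts m h]
  simp

-- A's loop state tracked against the cut-list loop
theorem loop_invariant (cs : List Char) (n : Nat) :
    let A := (List.range n).foldl (solveLoopA cs) (0, [], 0)
    let B := (List.range n).foldl (solveLoopB cs) (0, [0])
    A.1 = B.1 ∧ B.2 ≠ [] ∧ A.2.2 = B.2.getLastD 0 ∧ A.2.1 = zipSlices cs B.2 := by
  induction n with
  | zero => simp [zipSlices]
  | succ n ih =>
    obtain ⟨h1, h2, h3, h4⟩ := ih
    simp only [List.range_succ, List.foldl_append, List.foldl_cons, List.foldl_nil]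
    set A := (List.range n).foldl (solveLoopA cs) (0, [], 0) with hA
    set B := (List.range n).foldl (solveLoopB cs) (0, [0]) with hB
    unfold solveLoopA solveLoopB
    rw [h1]
    by_cases hz : (if cs[n]! = '(' then B.1 + 1 else B.1 - 1) = 0
    · simp only [hz, if_pos]
      refine ⟨by simp, by simp, by simp, ?_⟩
      rw [h4, zipSlices_append cs B.2 (n + 1) h2, h3]
      have hcast : ((n : Int) + 1) = (((n + 1 : Nat)) : Int) := by push_cast; ring
      rw [hcast]
      rcases List.exists_cons_of_ne_nil h2 with ⟨a, t, ht⟩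
      simp [ht, getLastD_irrel a t 0 (n + 1)]
    · simp only [hz]
      exact ⟨rfl, h2, h3, h4⟩

-- the cut-list fold over an interval is exactly the divide-and-conquer recursion
theorem range'_split (lo mid hi : Nat) (h1 : lo ≤ mid) (h2 : mid ≤ hi) :
    List.range' lo (hi - lo) = List.range' lo (mid - lo) ++ List.range' mid (hi - mid) := by
  have h := (List.range'_append (s := lo) (m := mid - lo) (n := hi - mid) (step := 1))
  simp only [Nat.one_mul] at h
  rw [show lo + (mid - lo) = mid from by omega] at h
  rw [show hi - lo = (mid - lo) + (hi - mid) from by omega]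
  exact h.symm

theorem zeros_fold (cs : List Char) (lo hi : Nat) (h : lo < hi) (b : Int) (acc : List Nat) :
    (List.range' lo (hi - lo)).foldl (solveLoopB cs) (b, acc) =
      ((zerosB cs lo hi b).2, acc ++ (zerosB cs lo hi b).1) := by
  induction hlen : hi - lo using Nat.strong_induction_on generalizing lo hi b acc with
  | _ m ih =>
    subst hlen
    by_cases h1 : hi - lo = 1
    · rw [zerosB, if_pos (by omega), if_pos h1, h1]
      have he : hi = lo + 1 := by omega
      subst he
      simp only [List.range'_one, List.foldl_cons, List.foldl_nil]
      unfold solveLoopB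
      by_cases hc : cs[lo]! = '('
      · simp only [hc, if_pos]
        by_cases hz : b + 1 = 0 <;> simp [hz]
      · simp only [hc, if_false]
        by_cases hz : b - 1 = 0
        · simp [hz, show b + -1 = 0 from by omega]
        · simp [hz, show ¬(b + -1 = 0) from by omega]
          omega
    · have h2 : 2 ≤ hi - lo := by omega
      rw [zerosB, if_neg (by omega)]
      set mid := (lo + hi) / 2 with hmid
      have hlm : lo < mid := by omega
      have hmh : mid < hi := by omega
      rw [range'_split lo mid hi (by omega) (by omega), List.foldl_append]
      rw [ih (mid - lo) (by omega) lo mid hlm b acc rfl]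
      rw [ih (hi - mid) (by omega) mid hi hmh _ _ rfl]
      simp

-- ===== VERDICT (by name: the statement is the Claim_ definition above) =====
theorem solve_spec : Claim_equal_solve := by
  intro s _
  unfold Spec_solve solve solve_alt
  have hmain := (loop_invariant s.toList s.toList.length).2.2.2
  rw [hmain]
  show zipSlices s.toList _ = zipSlices s.toList _
  congr 1
  by_cases hn : s.toList.length = 0
  · simp [hn]
  · rw [if_neg hn]
    have h := zeros_fold s.toList 0 s.toList.length (by omega) 0 [0]
    rw [List.range_eq_range'] at *
    simp only [Nat.sub_zero] at h
    rw [h]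
    simp
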